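-- pv_equiv track=rewrite | github.com/alis-khadka/llm_program_grader | dataset/solutions/21_22-2-1-python/R3NZURQV.py | calc
-- ===== SOURCE A (Python) =====
-- def calc(A, B):
--     C = []
--     for i in range(10**6 + 1):
--         C.append(0)
--     for a in A:
--         C[a] = C[a] + 1
--     sol = ""
--     for i in range(len(B)):
--         if C[i] <= B[i]:
--             sol += "1"
--         else:
--             sol += "0"
--     return sol
-- ===== SOURCE B (Python) =====
-- def _bisect_left(s, x):
--     lo, hi = 0, len(s)
--     while lo < hi:
--         mid = (lo + hi) // 2
--         if s[mid] < x:
--             lo = mid + 1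
--         else:
--             hi = mid
--     return lo
--
--
-- def _bisect_right(s, x):
--     lo, hi = 0, len(s)
--     while lo < hi:
--         mid = (lo + hi) // 2
--         if x < s[mid]:
--             hi = mid
--         else:
--             lo = mid + 1
--     return lo
--
--
-- def calc(A, B):
--     s = sorted(A)
--     return "".join(
--         "1" if _bisect_right(s, i) - _bisect_left(s, i) <= b else "0"
--         for i, b in enumerate(B)
--     )
-- ===== Notes on version B (the rewrite author's own statement) =====
-- stated objective: alternative
-- what changed: B sorts A once and computes each query value's frequency by two binary searches (bisect_right - bisect_left on the sorted copy), instead of A's preallocated 10^6+1-slot bucket table filled by direct indexing.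
-- intended difference: On inputs containing a value a in [-1000001,0) whose wrapped slot 1000001+a falls below len(B) and flips a threshold comparison, A counts a into that slot via Python's negative-index wraparound and emits '0' there, while B emits '1' by counting only the value's own occurrences, which is the intended frequency test. — e.g. on calc([-1000001], [0]): A returns "0", B returns "1"
import Mathlib
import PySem

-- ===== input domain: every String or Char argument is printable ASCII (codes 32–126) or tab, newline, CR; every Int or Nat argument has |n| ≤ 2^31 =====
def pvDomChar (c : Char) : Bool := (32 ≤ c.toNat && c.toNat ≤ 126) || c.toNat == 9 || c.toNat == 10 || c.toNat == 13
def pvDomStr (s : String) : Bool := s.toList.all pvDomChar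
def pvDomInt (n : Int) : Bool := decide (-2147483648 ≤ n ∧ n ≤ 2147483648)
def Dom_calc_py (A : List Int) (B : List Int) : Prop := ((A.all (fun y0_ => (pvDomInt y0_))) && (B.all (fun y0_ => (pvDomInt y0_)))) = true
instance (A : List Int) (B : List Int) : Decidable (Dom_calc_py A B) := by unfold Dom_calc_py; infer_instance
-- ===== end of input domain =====

-- B replaces A's 10^6+1-slot bucket table with one sort of A and, per query index, two binary searches
-- (bisect_right - bisect_left) on the sorted copy to obtain the frequency.

-- ===== PORT A =====
-- pyIdx mirrors Python's list indexing C[i] for a list of length len exactly: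
-- nonnegative index in range, negative index wraps by +len, otherwise none (IndexError).
def pyIdx (len : Nat) (i : Int) : Option Nat :=
  if 0 ≤ i then (if i < (len : Int) then some i.toNat else none)
  else (if 0 ≤ i + (len : Int) then some (i + (len : Int)).toNat else none)

def calc_py (A : List Int) (B : List Int) : String :=
  let C : Array Int := (PySem.List.pyRange 0 1000001 1).foldl (fun C _ => C.push 0) #[]
  let C : Array Int := A.foldl (fun C a =>
    match pyIdx C.size a with
    | some j => C.set! j (C[j]! + 1)
    | none => C) C
  let sol : List Char := (PySem.List.pyRange 0 (B.length : Int) 1).foldl (fun sol i =>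
    match pyIdx C.size i, PySem.List.pyGet? B i with
    | some j, some b => sol ++ (if C[j]! ≤ b then ['1'] else ['0'])
    | _, _ => sol) []
  String.ofList sol

-- ===== PORT B =====
-- Source B's hand-written _bisect_left/_bisect_right while-loops are exactly the loops of
-- PySem.List.bisectLeft / PySem.List.bisectRight (mid = (lo+hi)//2, same branch tests), so the
-- port uses those primitives.
def calc_py_alt (A : List Int) (B : List Int) : String :=
  let s := PySem.List.sorted A (fun x => x) false
  PySem.Str.join "" ((PySem.List.enumerate B 0).map (fun p =>
    if ((PySem.List.bisectRight s p.1 : Int) - (PySem.List.bisectLeft s p.1 : Int)) ≤ p.2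
    then "1" else "0"))

-- ===== PRECONDITION & SPEC =====
-- Pre_ excludes exactly the inputs on which the Python A raises IndexError: some value of A
-- outside [-1000001, 1000000] (out of range even after Python's negative wrap), or len(B) > 1000001.
def Pre_calc_py (A : List Int) (B : List Int) : Prop :=
  B.length ≤ 1000001 ∧ ∀ a ∈ A, -1000001 ≤ a ∧ a ≤ 1000000
instance (A : List Int) (B : List Int) : Decidable (Pre_calc_py A B) := by unfold Pre_calc_py; infer_instance
def pvWitness_calc_py : List Int × List Int := ([1, 2, -5, 2], [0, 2, 1])

-- On inputs containing a value a in [-1000001,0) whose wrapped slot 1000001+a falls below len(B)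
-- and flips a threshold comparison, A counts a into that slot via Python's negative-index
-- wraparound and emits '0' there, while B emits '1' by counting only the value's own occurrences,
-- which is the intended frequency test.
def D_calc_py (A : List Int) (B : List Int) : Prop :=
  ∃ k ∈ List.range B.length,
    A.count ((k : Int) - 1000001) ≠ 0 ∧
    ((A.count ((k : Int)) : Int) ≤ B.getD k 0) ∧
    ¬((A.count ((k : Int)) : Int) + (A.count ((k : Int) - 1000001) : Int) ≤ B.getD k 0)
instance (A : List Int) (B : List Int) : Decidable (D_calc_py A B) := by unfold D_calc_py; infer_instance

def Spec_calc_py (A : List Int) (B : List Int) (out : String) : Prop := ¬ D_calc_py A B → out = calc_py_alt A B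
instance (A : List Int) (B : List Int) (out : String) : Decidable (Spec_calc_py A B out) := by unfold Spec_calc_py; infer_instance

def pvDiffWitness_calc_py : List Int × List Int := ([-1000001], [0])
def pvDiffWitnessOut_calc_py : String × String := ("0", "1")

-- ===== CLAIM (what is proved, stated in full; the proofs are below) =====
def Claim_unchanged_calc_py : Prop := ∀ (A : List Int) (B : List Int), Dom_calc_py A B → Pre_calc_py A B → Spec_calc_py A B (calc_py A B)
def Claim_changed_calc_py : Prop := Dom_calc_py (pvDiffWitness_calc_py.1) (pvDiffWitness_calc_py.2) ∧ Pre_calc_py (pvDiffWitness_calc_py.1) (pvDiffWitness_calc_py.2) ∧ D_calc_py (pvDiffWitness_calc_py.1) (pvDiffWitness_calc_py.2) ∧ calc_py (pvDiffWitness_calc_py.1) (pvDiffWitness_calc_py.2) = pvDiffWitnessOut_calc_py.1 ∧ calc_py_alt (pvDiffWitness_calc_py.1) (pvDiffWitness_calc_py.2) = pvDiffWitnessOut_calc_py.2 ∧ pvDiffWitnessOut_calc_py.1 ≠ pvDiffWitnessOut_calc_py.2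
def Claim_exact_calc_py : Prop := ∀ (A : List Int) (B : List Int), Dom_calc_py A B → Pre_calc_py A B → D_calc_py A B → calc_py A B ≠ calc_py_alt A B

-- ===== LEMMAS AND PROOFS =====

theorem size_foldl_push (l : List Int) (acc : Array Int) :
    (l.foldl (fun C _ => C.push (0 : Int)) acc).size = acc.size + l.length := by
  induction l generalizing acc with
  | nil => simp
  | cons x l ih => simp [List.foldl_cons]; omega

theorem len_pyRange_million : (PySem.List.pyRange 0 1000001 1).length = 1000001 := by
  rw [show ((1000001 : Int)) = ((1000001 : Nat) : Int) from rfl, PySem.List.pyRange_zero_natCast]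
  simp

theorem getElem?_foldl_push (l : List Int) (acc : Array Int) (j : Nat) :
    (l.foldl (fun C _ => C.push (0 : Int)) acc)[j]? =
      if j < acc.size then acc[j]? else if j < acc.size + l.length then some 0 else none := by
  induction l generalizing acc with
  | nil =>
    simp only [List.foldl_nil, List.length_nil, Nat.add_zero]
    by_cases h : j < acc.size
    · rw [if_pos h]
    · rw [if_neg h, if_neg h, Array.getElem?_eq_none (by omega)]
  | cons x l ih =>
    simp only [List.foldl_cons, ih, Array.size_push, Array.getElem?_push, List.length_cons]
    split_ifs with h1 h2 h3 h4 <;> try (first | rfl | omega)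

theorem set!_getElem! (C : Array Int) (j k : Nat) (v : Int) (hk : k < C.size) :
    (C.set! j v)[k]! = if j = k then v else C[k]! := by
  simp only [Array.set!, Array.getElem!_eq_getD, Array.getD_eq_getD_getElem?,
    Array.getElem?_setIfInBounds]
  split_ifs with h1 h2 <;> simp_all

theorem pyIdx_lt (len : Nat) (i : Int) (j : Nat) (h : pyIdx len i = some j) : j < len := by
  unfold pyIdx at h
  split_ifs at h <;> simp_all <;> omega

theorem size_upd_step (C : Array Int) (a : Int) :
    (match pyIdx C.size a with
      | some j => C.set! j (C[j]! + 1)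
      | none => C).size = C.size := by
  cases pyIdx C.size a <;> simp [Array.set!]

theorem size_foldl_upd (l : List Int) (C : Array Int) :
    (l.foldl (fun C a =>
      match pyIdx C.size a with
      | some j => C.set! j (C[j]! + 1)
      | none => C) C).size = C.size := by
  induction l generalizing C with
  | nil => rfl
  | cons x l ih => rw [List.foldl_cons, ih, size_upd_step]

theorem getElem!_foldl_upd (l : List Int) (C : Array Int) (j : Nat) (hj : j < C.size) :
    (l.foldl (fun C a =>
      match pyIdx C.size a with
      | some j => C.set! j (C[j]! + 1)
      | none => C) C)[j]! = C[j]! + (l.countP (fun a => pyIdx C.size a == some j) : Int) := by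
  induction l generalizing C with
  | nil => simp
  | cons x l ih =>
    rw [List.foldl_cons, List.countP_cons]
    have hsz := size_upd_step C x
    have := ih (match pyIdx C.size x with
      | some j => C.set! j (C[j]! + 1)
      | none => C) (by rw [hsz]; exact hj)
    rw [this, hsz]
    cases h : pyIdx C.size x with
    | none => simp
    | some j0 =>
      have hj0 := pyIdx_lt _ _ _ h
      simp only [set!_getElem! C j0 j _ hj]
      by_cases hjj : j0 = j
      · subst hjj; simp; omega
      · simp [hjj]

theorem pyIdx_eq_iff (a : Int) (j : Nat) (ha : -1000001 ≤ a ∧ a ≤ 1000000) (hj : j < 1000001) :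
    pyIdx 1000001 a = some j ↔ (a = (j : Int) ∨ a = (j : Int) - 1000001) := by
  unfold pyIdx
  split_ifs with h1 h2 h3 <;> simp <;> omega

theorem countP_pyIdx (A : List Int) (hA : ∀ a ∈ A, -1000001 ≤ a ∧ a ≤ 1000000) (j : Nat) (hj : j < 1000001) :
    A.countP (fun a => pyIdx 1000001 a == some j) = A.count ((j : Int)) + A.count ((j : Int) - 1000001) := by
  induction A with
  | nil => simp
  | cons x l ih =>
    have hx := hA x (by simp)
    rw [List.countP_cons, List.count_cons, List.count_cons,
      ih (fun a ha => hA a (by simp [ha]))]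
    by_cases h : pyIdx 1000001 x = some j
    · have e1 : (pyIdx 1000001 x == some j) = true := by simp [h]
      rcases (pyIdx_eq_iff x j hx hj).mp h with h2 | h2
      · have e2 : ¬ (x = (j:Int) - 1000001) := by omega
        simp only [e1, beq_iff_eq, if_pos h2, if_neg e2, if_true]
        omega
      · have e2 : ¬ (x = (j:Int)) := by omega
        simp only [e1, beq_iff_eq, if_pos h2, if_neg e2, if_true]
        omega
    · have e1 : (pyIdx 1000001 x == some j) = false := by simp [h]
      have h1 : ¬ (x = (j:Int)) := fun hc => h ((pyIdx_eq_iff x j hx hj).mpr (Or.inl hc))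
      have h2 : ¬ (x = (j:Int) - 1000001) := fun hc => h ((pyIdx_eq_iff x j hx hj).mpr (Or.inr hc))
      simp only [e1, beq_iff_eq, if_neg h1, if_neg h2, Bool.false_eq_true, if_false]
      omega

theorem table_cell (A : List Int) (hA : ∀ a ∈ A, -1000001 ≤ a ∧ a ≤ 1000000) (j : Nat) (hj : j < 1000001) :
    (A.foldl (fun C a =>
      match pyIdx C.size a with
      | some j => C.set! j (C[j]! + 1)
      | none => C) ((PySem.List.pyRange 0 1000001 1).foldl (fun C _ => C.push (0 : Int)) (#[] : Array Int)))[j]! =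
      (A.count ((j : Int)) : Int) + (A.count ((j : Int) - 1000001) : Int) := by
  generalize hC0 : (PySem.List.pyRange 0 1000001 1).foldl (fun C _ => C.push (0 : Int)) #[] = C0
  have hsz : C0.size = 1000001 := by
    rw [← hC0, size_foldl_push, len_pyRange_million]
    simp
  have hcell : C0[j]! = 0 := by
    rw [Array.getElem!_eq_getD, Array.getD_eq_getD_getElem?, ← hC0, getElem?_foldl_push]
    simp [hj]
  rw [getElem!_foldl_upd A C0 j (by omega), hcell, hsz, countP_pyIdx A hA j hj]
  push_cast
  ring

theorem calc_py_eq_map (A : List Int) (B : List Int)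
    (hB : B.length ≤ 1000001) (hA : ∀ a ∈ A, -1000001 ≤ a ∧ a ≤ 1000000) :
    calc_py A B = String.ofList ((List.range B.length).map (fun (k : Nat) =>
      if (A.count ((k : Int)) : Int) + (A.count ((k : Int) - 1000001) : Int) ≤ B.getD k 0 then '1' else '0')) := by
  unfold calc_py
  dsimp only
  generalize hCA : A.foldl (fun (C : Array Int) a =>
    match pyIdx C.size a with
    | some j => C.set! j (C[j]! + 1)
    | none => C) ((PySem.List.pyRange 0 1000001 1).foldl (fun C _ => C.push (0 : Int)) (#[] : Array Int)) = CA
  have hsz : CA.size = 1000001 := by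
    rw [← hCA, size_foldl_upd, size_foldl_push, len_pyRange_million]
    simp
  have hbody : ∀ (sol : List Char), ∀ i ∈ PySem.List.pyRange 0 (B.length : Int) 1,
      (match pyIdx CA.size i, PySem.List.pyGet? B i with
        | some j, some b => sol ++ (if CA[j]! ≤ b then ['1'] else ['0'])
        | _, _ => sol)
      = sol ++ [if CA[i.toNat]! ≤ B.getD i.toNat 0 then '1' else '0'] := by
    intro sol i hi
    rw [PySem.List.mem_pyRange_one] at hi
    have h1 : pyIdx CA.size i = some i.toNat := by
      unfold pyIdx
      rw [if_pos hi.1, if_pos (by omega)]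
    have hlt : i.toNat < B.length := by omega
    have h2 : PySem.List.pyGet? B i = some (B.getD i.toNat 0) := by
      have e : PySem.List.pyGet? B i = B[i.toNat]? := by
        rw [show i = ((i.toNat : Nat) : Int) by omega, PySem.List.pyGet?_natCast,
          Int.toNat_natCast]
      rw [e, List.getElem?_eq_getElem hlt, List.getD_eq_getElem _ _ hlt]
    rw [h1, h2]
    show sol ++ (if CA[i.toNat]! ≤ B.getD i.toNat 0 then ['1'] else ['0'])
      = sol ++ [if CA[i.toNat]! ≤ B.getD i.toNat 0 then '1' else '0']
    split_ifs <;> rfl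
  rw [PySem.List.foldl_congr_mem _ _ _ _ hbody]
  have hmap := PySem.List.foldl_append_singleton_eq_map
    (fun (i : Int) => if CA[i.toNat]! ≤ B.getD i.toNat 0 then '1' else '0')
    (PySem.List.pyRange 0 (B.length : Int) 1) []
  rw [hmap]
  rw [show ((B.length : Int)) = ((B.length : Nat) : Int) from rfl, PySem.List.pyRange_zero_natCast,
    List.map_map]
  simp only [List.nil_append, Function.comp_def, Int.toNat_natCast]
  congr 1
  apply List.map_congr_left
  intro k hk
  rw [List.mem_range] at hk
  rw [← hCA]
  simp only [table_cell A hA k (by omega)]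

-- countP of a predicate that holds exactly on the index interval [a, b) of s equals b - a.
theorem countP_of_interval (p : Int → Bool) : ∀ (s : List Int) (a b : Nat), a ≤ b → b ≤ s.length →
    (∀ j (h : j < s.length), p s[j] = true ↔ (a ≤ j ∧ j < b)) → s.countP p = b - a := by
  intro s
  induction s with
  | nil => intro a b hab hb _; simp only [List.countP_nil]; simp at hb; omega
  | cons x t ih =>
    intro a b hab hb hch
    have ht : ∀ j (h : j < t.length), p t[j] = true ↔ (a - 1 ≤ j ∧ j < b - 1) := by
      intro j hj
      have := hch (j + 1) (by simp; omega)
      simp only [List.getElem_cons_succ] at this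
      rw [this]
      omega
    rw [List.countP_cons, ih (a - 1) (b - 1) (by omega) (by simp at hb; omega) ht]
    have hx := hch 0 (by simp)
    simp only [List.getElem_cons_zero] at hx
    by_cases hh : a ≤ 0 ∧ 0 < b
    · rw [if_pos (hx.mpr ⟨by omega, by omega⟩)]; omega
    · rw [if_neg (by intro hc; exact hh (hx.mp hc))]; omega

theorem bisect_count (s : List Int) (x : Int) (hs : s.Pairwise (· ≤ ·)) :
    PySem.List.bisectLeft s x ≤ PySem.List.bisectRight s x ∧
    s.count x = PySem.List.bisectRight s x - PySem.List.bisectLeft s x := by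
  obtain ⟨hl1, hl2, hl3⟩ := PySem.List.bisectLeft_spec s x hs
  obtain ⟨hr1, hr2, hr3⟩ := PySem.List.bisectRight_spec s x hs
  have hle : PySem.List.bisectLeft s x ≤ PySem.List.bisectRight s x := by
    by_contra hc
    have hlt : PySem.List.bisectRight s x < s.length := by omega
    have := hl2 _ hlt (by omega)
    have := hr3 _ hlt (le_refl _)
    omega
  refine ⟨hle, ?_⟩
  have : s.count x = s.countP (fun y => y == x) := by simp [List.count]
  rw [this, countP_of_interval (fun y => y == x) s _ _ hle hr1]
  intro j hj
  simp only [beq_iff_eq]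
  constructor
  · intro he
    constructor
    · by_contra hc
      have := hl2 j hj (by omega)
      omega
    · by_contra hc
      have := hr3 j hj (by omega)
      omega
  · intro ⟨h1, h2⟩
    have := hl3 j hj h1
    have := hr2 j hj h2
    omega

theorem join_nil_map_singleton {α : Type} (f : α → Char) (l : List α) :
    PySem.Chars.join [] (l.map (fun x => [f x])) = l.map f := by
  rw [show (fun x => [f x]) = ((fun c => [c]) ∘ f) from rfl, ← List.map_map,
    PySem.Chars.join_nil_singletons]

theorem calc_py_alt_toList (A : List Int) (B : List Int) :
    calc_py_alt A B = String.ofList ((List.range B.length).map (fun (k : Nat) =>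
      if (A.count (k : Int) : Int) ≤ B.getD k 0 then '1' else '0')) := by
  rw [← String.toList_inj, String.toList_ofList]
  unfold calc_py_alt
  dsimp only
  rw [PySem.Str.toList_join]
  rw [PySem.List.enumerate_eq_map_pyRange B 0]
  simp only [PySem.List.len_eq]
  rw [show ((B.length : Int)) = ((B.length : Nat) : Int) from rfl, PySem.List.pyRange_zero_natCast]
  have hs : (PySem.List.sorted A (fun x => x) false).Pairwise (· ≤ ·) :=
    PySem.List.sorted_pairwise A (fun x => x)
  have hperm : (PySem.List.sorted A (fun x => x) false).Perm A :=
    PySem.List.sorted_perm A (fun x => x) false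
  have hcnt : ∀ (k : Nat),
      ((PySem.List.bisectRight (PySem.List.sorted A (fun x => x) false) ((k : Int)) : Int)
        - (PySem.List.bisectLeft (PySem.List.sorted A (fun x => x) false) ((k : Int)) : Int))
      = (A.count ((k : Int)) : Int) := by
    intro k
    obtain ⟨hle, hc⟩ := bisect_count (PySem.List.sorted A (fun x => x) false) ((k : Int)) hs
    rw [← hperm.count_eq, hc]
    omega
  have : ∀ (k : Nat),
      String.toList (if ((PySem.List.bisectRight (PySem.List.sorted A (fun x => x) false) ((k:Int)) : Int)
          - (PySem.List.bisectLeft (PySem.List.sorted A (fun x => x) false) ((k:Int)) : Int))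
          ≤ PySem.List.pyGetD B ((k:Int)) 0 then "1" else "0")
      = [if (A.count ((k : Int)) : Int) ≤ B.getD k 0 then '1' else '0'] := by
    intro k
    rw [hcnt k, PySem.List.pyGetD_natCast]
    simp only [apply_ite String.toList, List.getD]
    split_ifs <;> rfl
  simp only [List.map_map, Function.comp_def, this]
  rw [show "".toList = ([] : List Char) from rfl, join_nil_map_singleton]

-- ===== VERDICT (by name: the statement is the Claim_ definition above) =====
theorem calc_py_spec : Claim_unchanged_calc_py := by
  intro A B _ hPre hND
  rw [calc_py_eq_map A B hPre.1 hPre.2, calc_py_alt_toList]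
  congr 1
  apply List.map_congr_left
  intro k hk
  rw [List.mem_range] at hk
  split_ifs with h1 h2 h2
  · rfl
  · exact absurd (by omega : (A.count ((k : Int)) : Int) ≤ B.getD k 0) h2
  · exact absurd ⟨k, List.mem_range.mpr hk, by omega, h2, h1⟩ hND
  · rfl

theorem calc_py_changed : Claim_changed_calc_py := by
  unfold Claim_changed_calc_py
  refine ⟨by decide, by decide, by decide, ?_, by decide, by decide⟩
  show calc_py [-1000001] [0] = "0"
  rw [calc_py_eq_map [-1000001] [0] (by decide) (by decide)]
  decide

theorem calc_py_tight : Claim_exact_calc_py := by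
  intro A B _ hPre hD heq
  rw [calc_py_eq_map A B hPre.1 hPre.2, calc_py_alt_toList] at heq
  have h := congrArg String.toList heq
  rw [String.toList_ofList, String.toList_ofList] at h
  rw [List.map_eq_map_iff] at h
  obtain ⟨k, hk, hd, hle, hgt⟩ := hD
  have := h k hk
  rw [List.mem_range] at hk
  rw [if_neg hgt, if_pos hle] at this
  exact absurd this (by decide)
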